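-- pv_equiv track=rewrite | github.com/ffancer/study_with_codewars_part2 | 7 kyu Alternate Square Sum.py | alternate_sq_sum
-- ===== SOURCE A (Python) =====
-- def alternate_sq_sum(arr):
--     total = 0
--
--     for i, j in enumerate(arr):
--         if i % 2 == 0:
--             total += j
--         else:
--             total += j ** 2
--
--     return total
-- ===== SOURCE B (Python) =====
-- def alternate_sq_sum(arr):
--     # Consume the list two elements at a time: each pair contributes
--     # first + second**2; a leftover single element is added as-is.
--     total = 0
--     i = 0
--     n = len(arr)
--     while i + 1 < n:
--         total += arr[i] + arr[i + 1] ** 2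
--         i += 2
--     if i < n:
--         total += arr[i]
--     return total
-- ===== Notes on version B (the rewrite author's own statement) =====
-- stated objective: alternative
-- what changed: Replaced the enumerate loop with an index-parity branch by a pairwise loop that steps through the list two elements at a time (pair contributes x + y**2, trailing single element added as-is), removing the parity test entirely.
import Mathlib
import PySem

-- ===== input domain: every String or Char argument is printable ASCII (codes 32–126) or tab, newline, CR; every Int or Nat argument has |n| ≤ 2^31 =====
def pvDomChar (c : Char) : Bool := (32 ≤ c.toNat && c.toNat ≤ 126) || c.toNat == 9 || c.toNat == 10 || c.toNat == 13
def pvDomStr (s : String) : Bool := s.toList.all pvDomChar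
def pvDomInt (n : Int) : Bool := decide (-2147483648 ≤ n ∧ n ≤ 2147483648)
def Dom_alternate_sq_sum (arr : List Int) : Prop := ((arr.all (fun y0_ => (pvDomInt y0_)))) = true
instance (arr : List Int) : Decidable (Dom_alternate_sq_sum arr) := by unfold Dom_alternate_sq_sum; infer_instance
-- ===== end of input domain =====

-- B replaces the index-parity branch with a pairwise two-at-a-time loop (alternative decomposition, same cost).


-- ===== PORT A =====
def alternate_sq_sum (arr : List Int) : Int :=
  (PySem.List.enumerate arr).foldl
    (fun total ij => if PySem.Int.mod ij.1 2 == 0 then total + ij.2 else total + ij.2 ^ 2) 0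

-- ===== PORT B =====
-- B's while loop advances an index i by 2; the suffix arr[i:] is modelled by the
-- remaining list, so each step consumes two elements, with a leftover singleton case.
def altPairLoop (rest : List Int) (total : Int) : Int :=
  match rest with
  | a :: b :: t => altPairLoop t (total + a + b ^ 2)
  | [x] => total + x
  | [] => total

def alternate_sq_sum_alt (arr : List Int) : Int := altPairLoop arr 0

-- ===== PRECONDITION & SPEC =====
def Spec_alternate_sq_sum (arr : List Int) (out : Int) : Prop := out = alternate_sq_sum_alt arr
instance (arr : List Int) (out : Int) : Decidable (Spec_alternate_sq_sum arr out) := by unfold Spec_alternate_sq_sum; infer_instance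

-- ===== CLAIM (what is proved, stated in full; the proofs are below) =====
def Claim_equal_alternate_sq_sum : Prop := ∀ (arr : List Int), Dom_alternate_sq_sum arr → Spec_alternate_sq_sum arr (alternate_sq_sum arr)

-- ===== LEMMAS AND PROOFS =====

theorem foldl_enum_eq_pairLoop (t : List Int) (total : Int) : ∀ (s : Int), s % 2 = 0 →
    (PySem.List.enumerate t s).foldl
      (fun total ij => if PySem.Int.mod ij.1 2 == 0 then total + ij.2 else total + ij.2 ^ 2) total
      = altPairLoop t total := by
  induction t, total using altPairLoop.induct with
  | case1 total a b t ih =>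
      intro s hs
      have h1 : (PySem.Int.mod s 2 == 0) = true := by
        simp [PySem.Int.mod, Int.fmod_eq_emod]; omega
      have h2 : (PySem.Int.mod (s + 1) 2 == 0) = false := by
        simp [PySem.Int.mod, Int.fmod_eq_emod]; omega
      rw [PySem.List.enumerate_cons, PySem.List.enumerate_cons]
      simp only [List.foldl_cons, h1, h2, Bool.false_eq_true, if_true, if_false]
      rw [show s + 1 + 1 = s + 2 by ring, ih (s + 2) (by omega)]
      rfl
  | case2 total x =>
      intro s hs
      have h1 : (PySem.Int.mod s 2 == 0) = true := by
        simp [PySem.Int.mod, Int.fmod_eq_emod]; omega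
      rw [PySem.List.enumerate_cons, PySem.List.enumerate_nil]
      simp only [List.foldl_cons, List.foldl_nil, h1, reduceIte]
      rfl
  | case3 total =>
      intro s hs
      rw [PySem.List.enumerate_nil]
      rfl

-- ===== VERDICT (by name: the statement is the Claim_ definition above) =====
theorem alternate_sq_sum_spec : Claim_equal_alternate_sq_sum := by
  intro arr _
  unfold Spec_alternate_sq_sum alternate_sq_sum alternate_sq_sum_alt
  exact foldl_enum_eq_pairLoop arr 0 0 rfl
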